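-- pv_equiv track=rewrite | github.com/kseniakr1/labs_is | Lab4/Lab4.py | evaluate
-- ===== SOURCE A (Python) =====
-- maxPairCount = 4
--
-- INF = 100000000
--
-- TEACHER_DAY = 20
--
-- GROUP_DAY = 100
--
-- TEACHER_MUL = 1
--
-- GROUP_MUL = 5
--
-- teachers = ['Ivanov', 'Petrov', 'Sidorov', 'Vasya', 'Petya', 'Dima']
--
-- groups = ['Inf1', 'Inf2', 'TTP3', 'TTP4']
--
-- days = ['Monday', 'Tuesday', 'Wednesday', 'Thusday', 'Friday']
--
-- aud = [
--     [304, 'S'],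
--     [305, 'S'],
--     [306, 'S'],
--     [307, 'S'],
--     [41, 'L'],
--     [42, 'L'],
--        [43, 'L'],
--     #   [44, 'L']
-- ]
--
-- LARGE_COUNT = len(list(x for x in aud if x[1] == 'L'))
--
-- GROUP_ID = 1
--
-- DAY_ID = 2
--
-- NOM_ID = 3
--
-- def evaluate(x):
--     # for teacher
--     total = 0
--
--     for teacher in teachers:
--         x1 = [xval for xval in x if xval[0] == teacher]
--         for day in days:
--             x2 = [xval for xval in x1 if xval[2] == day]
--             x2.sort(key=lambda x: x[3])
--             for i in range(1, len(x2)):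
--                 if x2[i][3] == x2[i - 1][3]:
--                     return INF
--
--             if len(x2):
--                 total += TEACHER_MUL * (x2[-1][3] - x2[0][3] + 1) ** 2 + TEACHER_DAY
--                 if x2[-1][3] > maxPairCount:
--                     return INF
--
--     for group in groups:
--         x1 = [xval for xval in x if group in xval[1]]
--         for day in days:
--             x2 = [xval for xval in x1 if xval[2] == day]
--             x2.sort(key=lambda x: x[3])
--             for i in range(1, len(x2)):
--                 if x2[i][3] == x2[i - 1][3] and (
--                         x2[i][3] == group or x2[i - 1][3] == group or x2[i][3] == x2[i - 1][3]):
--                     return INF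
--
--             if len(x2):
--                 total += GROUP_MUL * (x2[-1][3] - x2[0][3] + 1) ** 2 + GROUP_DAY
--                 if x2[-1][3] > maxPairCount:
--                     return INF
--
--     for day in days:
--         for nom in range(maxPairCount):
--             x1 = [val for val in x if val[NOM_ID] == nom and val[DAY_ID] == day and ':' not in val[GROUP_ID]]
--             if len(x1) > LARGE_COUNT:
--                 return INF
--             x1 = [val for val in x if val[NOM_ID] == nom and val[DAY_ID] == day]
--             if len(x1) > len(aud):
--                 return INF
--
--     return total
-- ===== SOURCE B (Python) =====
-- maxPairCount = 4
--
-- INF = 100000000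
--
-- TEACHER_DAY = 20
--
-- GROUP_DAY = 100
--
-- TEACHER_MUL = 1
--
-- GROUP_MUL = 5
--
-- teachers = ['Ivanov', 'Petrov', 'Sidorov', 'Vasya', 'Petya', 'Dima']
--
-- groups = ['Inf1', 'Inf2', 'TTP3', 'TTP4']
--
-- days = ['Monday', 'Tuesday', 'Wednesday', 'Thusday', 'Friday']
--
-- aud = [
--     [304, 'S'],
--     [305, 'S'],
--     [306, 'S'],
--     [307, 'S'],
--     [41, 'L'],
--     [42, 'L'],
--     [43, 'L'],
-- ]
--
-- LARGE_COUNT = len(list(x for x in aud if x[1] == 'L'))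
--
--
-- def evaluate(x):
--     # One pass over x: bucket the pair numbers by (teacher, day) and by
--     # (group, day) (a record lands in every group whose name is a substring
--     # of its group field), and count records per (day, nom) twice (with and
--     # without ':' in the group field).
--     td = {}
--     gd = {}
--     cnt_nc = {}
--     cnt_all = {}
--     for rec in x:
--         if rec[0] in teachers and rec[2] in days:
--             td.setdefault((rec[0], rec[2]), []).append(rec[3])
--         for g in groups:
--             if g in rec[1] and rec[2] in days:
--                 gd.setdefault((g, rec[2]), []).append(rec[3])
--         if rec[2] in days and 0 <= rec[3] < maxPairCount:
--             cnt_all[(rec[2], rec[3])] = cnt_all.get((rec[2], rec[3]), 0) + 1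
--             if ':' not in rec[1]:
--                 cnt_nc[(rec[2], rec[3])] = cnt_nc.get((rec[2], rec[3]), 0) + 1
--     # Then judge each bucket: duplicate nom or nom beyond maxPairCount is a
--     # hard conflict; otherwise charge the span cost.  No sorting needed.
--     bad = False
--     total = 0
--     for t in teachers:
--         for d in days:
--             noms = td.get((t, d), [])
--             if noms:
--                 if len(set(noms)) < len(noms) or max(noms) > maxPairCount:
--                     bad = True
--                 total += TEACHER_MUL * (max(noms) - min(noms) + 1) ** 2 + TEACHER_DAY
--     for g in groups:
--         for d in days:
--             noms = gd.get((g, d), [])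
--             if noms:
--                 if len(set(noms)) < len(noms) or max(noms) > maxPairCount:
--                     bad = True
--                 total += GROUP_MUL * (max(noms) - min(noms) + 1) ** 2 + GROUP_DAY
--     for d in days:
--         for n in range(maxPairCount):
--             if cnt_nc.get((d, n), 0) > LARGE_COUNT or cnt_all.get((d, n), 0) > len(aud):
--                 bad = True
--     return INF if bad else total
-- ===== Notes on version B (the rewrite author's own statement) =====
-- stated objective: alternative
-- what changed: A rescans and sorts x once per teacher/day, group/day and day/nom combination (~70 filtered passes) with early returns; B makes one bucketing pass over x building (teacher,day)/(group,day) nom-list dicts and two (day,nom) counters, then judges each bucket via set-size/max/min with an accumulated conflict flag, returning INF at the end if any conflict fired.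
import Mathlib
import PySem

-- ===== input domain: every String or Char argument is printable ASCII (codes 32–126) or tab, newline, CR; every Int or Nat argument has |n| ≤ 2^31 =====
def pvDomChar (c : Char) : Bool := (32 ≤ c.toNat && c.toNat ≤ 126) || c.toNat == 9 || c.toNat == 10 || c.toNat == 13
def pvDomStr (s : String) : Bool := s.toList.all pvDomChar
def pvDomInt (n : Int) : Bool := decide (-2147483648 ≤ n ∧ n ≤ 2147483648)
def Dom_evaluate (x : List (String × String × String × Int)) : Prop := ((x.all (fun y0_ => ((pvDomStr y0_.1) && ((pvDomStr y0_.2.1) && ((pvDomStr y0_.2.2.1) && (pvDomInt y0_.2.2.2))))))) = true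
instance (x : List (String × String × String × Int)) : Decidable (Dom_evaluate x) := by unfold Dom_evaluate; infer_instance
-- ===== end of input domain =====

-- B replaces A's ~70 filtered passes over x (one per teacher/group/day and day/nom
-- combination, the bucket ones sorted) by ONE bucketing pass building dictionaries, then
-- judges each bucket with set/max/min and an accumulated conflict flag instead of early
-- returns.  Objective: alternative (different algorithm, comparable measured cost).

-- module-level constants shared by both ports (they are module globals in the Python file)
abbrev PvRec : Type := String × String × String × Int

def pvMaxPairCount : Int := 4
def pvINF : Int := 100000000
def pvTEACHER_DAY : Int := 20
def pvGROUP_DAY : Int := 100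
def pvTEACHER_MUL : Int := 1
def pvGROUP_MUL : Int := 5
def pvTeachers : List String := ["Ivanov", "Petrov", "Sidorov", "Vasya", "Petya", "Dima"]
def pvGroups : List String := ["Inf1", "Inf2", "TTP3", "TTP4"]
def pvDays : List String := ["Monday", "Tuesday", "Wednesday", "Thusday", "Friday"]
def pvAud : List (Int × String) := [(304, "S"), (305, "S"), (306, "S"), (307, "S"), (41, "L"), (42, "L"), (43, "L")]
def pvLARGE_COUNT : Int := ((pvAud.filter (fun a => a.2 == "L")).length : Int)
def pvNom (r : PvRec) : Int := r.2.2.2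
-- default record for pyGetD; never returned (every index A uses is in range)
def pvDflt : PvRec := ("", "", "", 0)

-- ===== PORT A =====
-- body of A's teacher/day bucket handling: duplicate-nom scan (the range loop with its
-- early `return INF`), then the span cost and the max-pair check; `none` = returned INF
def pvAStepT (acc : Option Int) (x2 : List PvRec) : Option Int :=
  match acc with
  | none => none
  | some total =>
    if (PySem.List.pyRange 1 (x2.length : Int) 1).any
        (fun i => pvNom (PySem.List.pyGetD x2 i pvDflt) == pvNom (PySem.List.pyGetD x2 (i - 1) pvDflt)) then
      none
    else if x2.length ≠ 0 then
      let total' := total + pvTEACHER_MUL * (pvNom (PySem.List.pyGetD x2 (-1) pvDflt) - pvNom (PySem.List.pyGetD x2 0 pvDflt) + 1) ^ (2 : Nat) + pvTEACHER_DAY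
      if pvNom (PySem.List.pyGetD x2 (-1) pvDflt) > pvMaxPairCount then none else some total'
    else some total

-- group/day variant: A's duplicate condition carries two extra disjuncts comparing the int
-- x2[i][3] with the str `group`; in Python `int == str` is False, ported as `false`
def pvAStepG (acc : Option Int) (x2 : List PvRec) : Option Int :=
  match acc with
  | none => none
  | some total =>
    if (PySem.List.pyRange 1 (x2.length : Int) 1).any
        (fun i => pvNom (PySem.List.pyGetD x2 i pvDflt) == pvNom (PySem.List.pyGetD x2 (i - 1) pvDflt)
          && (false || false || pvNom (PySem.List.pyGetD x2 i pvDflt) == pvNom (PySem.List.pyGetD x2 (i - 1) pvDflt))) then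
      none
    else if x2.length ≠ 0 then
      let total' := total + pvGROUP_MUL * (pvNom (PySem.List.pyGetD x2 (-1) pvDflt) - pvNom (PySem.List.pyGetD x2 0 pvDflt) + 1) ^ (2 : Nat) + pvGROUP_DAY
      if pvNom (PySem.List.pyGetD x2 (-1) pvDflt) > pvMaxPairCount then none else some total'
    else some total

def evaluate (x : List (String × String × String × Int)) : Int :=
  let afterT := pvTeachers.foldl (fun acc teacher =>
    let x1 := x.filter (fun xval => xval.1 == teacher)
    pvDays.foldl (fun acc day =>
      pvAStepT acc (PySem.List.sorted (x1.filter (fun xval => xval.2.2.1 == day)) pvNom)) acc) (some 0)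
  let afterG := pvGroups.foldl (fun acc group =>
    let x1 := x.filter (fun xval => PySem.Str.isIn group xval.2.1)
    pvDays.foldl (fun acc day =>
      pvAStepG acc (PySem.List.sorted (x1.filter (fun xval => xval.2.2.1 == day)) pvNom)) acc) afterT
  let afterN := pvDays.foldl (fun acc day =>
    (PySem.List.pyRange 0 pvMaxPairCount 1).foldl (fun acc nom =>
      match acc with
      | none => none
      | some total =>
        if ((x.filter (fun val => val.2.2.2 == nom && val.2.2.1 == day && !(PySem.Str.isIn ":" val.2.1))).length : Int) > pvLARGE_COUNT then none
        else if ((x.filter (fun val => val.2.2.2 == nom && val.2.2.1 == day)).length : Int) > (pvAud.length : Int) then none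
        else some total) acc) afterG
  match afterN with
  | none => pvINF
  | some total => total

-- ===== PORT B =====
-- the four dictionary updates B performs for one record of its single pass over x
-- td.setdefault((rec[0], rec[2]), []).append(rec[3])
def pvStepTD (d : PySem.Dict (String × String) (List Int)) (r : PvRec) : PySem.Dict (String × String) (List Int) :=
  if pvTeachers.contains r.1 && pvDays.contains r.2.2.1 then
    d.modify (r.1, r.2.2.1) [] (fun l => l ++ [r.2.2.2]) else d
-- gd.setdefault((g, rec[2]), []).append(rec[3]) for each matching g
def pvStepGD (d : PySem.Dict (String × String) (List Int)) (r : PvRec) : PySem.Dict (String × String) (List Int) :=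
  pvGroups.foldl (fun d g =>
    if PySem.Str.isIn g r.2.1 && pvDays.contains r.2.2.1 then
      d.modify (g, r.2.2.1) [] (fun l => l ++ [r.2.2.2]) else d) d
-- cnt_nc[(rec[2], rec[3])] = cnt_nc.get(..., 0) + 1  (only without ':' in the group field)
def pvStepNC (d : PySem.Dict (String × Int) Int) (r : PvRec) : PySem.Dict (String × Int) Int :=
  if (pvDays.contains r.2.2.1 && (decide (0 ≤ r.2.2.2) && decide (r.2.2.2 < pvMaxPairCount))) && !(PySem.Str.isIn ":" r.2.1) then
    d.insert (r.2.2.1, r.2.2.2) (d.getD (r.2.2.1, r.2.2.2) 0 + 1) else d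
-- cnt_all[(rec[2], rec[3])] = cnt_all.get(..., 0) + 1
def pvStepALL (d : PySem.Dict (String × Int) Int) (r : PvRec) : PySem.Dict (String × Int) Int :=
  if pvDays.contains r.2.2.1 && (decide (0 ≤ r.2.2.2) && decide (r.2.2.2 < pvMaxPairCount)) then
    d.insert (r.2.2.1, r.2.2.2) (d.getD (r.2.2.1, r.2.2.2) 0 + 1) else d

-- judging one bucket: duplicate nom (via set size) or nom beyond maxPairCount sets the
-- conflict flag; every nonempty bucket is charged the span cost
def pvBStep (mul cost : Int) (st : Bool × Int) (noms : List Int) : Bool × Int :=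
  match noms with
  | [] => st
  | _ :: _ =>
    let mx := (PySem.List.max? noms (fun v => v)).getD 0
    let mn := (PySem.List.min? noms (fun v => v)).getD 0
    let bad := st.1 || (decide (PySem.Set.len (PySem.Set.ofList noms) < (noms.length : Int)) || decide (mx > pvMaxPairCount))
    (bad, st.2 + mul * (mx - mn + 1) ^ (2 : Nat) + cost)

def evaluate_alt (x : List (String × String × String × Int)) : Int :=
  let ds := x.foldl (fun st r => (pvStepTD st.1 r, pvStepGD st.2.1 r, pvStepNC st.2.2.1 r, pvStepALL st.2.2.2 r))
    ((PySem.Dict.empty, PySem.Dict.empty, PySem.Dict.empty, PySem.Dict.empty) :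
      PySem.Dict (String × String) (List Int) × PySem.Dict (String × String) (List Int) ×
      PySem.Dict (String × Int) Int × PySem.Dict (String × Int) Int)
  let st1 := pvTeachers.foldl (fun st t =>
    pvDays.foldl (fun st d => pvBStep pvTEACHER_MUL pvTEACHER_DAY st (ds.1.getD (t, d) [])) st) (false, 0)
  let st2 := pvGroups.foldl (fun st g =>
    pvDays.foldl (fun st d => pvBStep pvGROUP_MUL pvGROUP_DAY st (ds.2.1.getD (g, d) [])) st) st1
  let bad := pvDays.foldl (fun b d =>
    (PySem.List.pyRange 0 pvMaxPairCount 1).foldl (fun b n =>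
      b || (decide (ds.2.2.1.getD (d, n) 0 > pvLARGE_COUNT) || decide (ds.2.2.2.getD (d, n) 0 > (pvAud.length : Int)))) b) st2.1
  if bad then pvINF else st2.2

-- ===== PRECONDITION & SPEC =====
def Spec_evaluate (x : List (String × String × String × Int)) (out : Int) : Prop := out = evaluate_alt x
instance (x : List (String × String × String × Int)) (out : Int) : Decidable (Spec_evaluate x out) := by unfold Spec_evaluate; infer_instance

-- ===== CLAIM (what is proved, stated in full; the proofs are below) =====
def Claim_equal_evaluate : Prop := ∀ (x : List (String × String × String × Int)), Dom_evaluate x → Spec_evaluate x (evaluate x)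

-- ===== LEMMAS AND PROOFS =====

-- canonical form of A's per-bucket work: the duplicate scan, the conflict bit, the cost
def pvDupT (x2 : List PvRec) : Bool :=
  (PySem.List.pyRange 1 (x2.length : Int) 1).any
    (fun i => pvNom (PySem.List.pyGetD x2 i pvDflt) == pvNom (PySem.List.pyGetD x2 (i - 1) pvDflt))

def pvBadT (x2 : List PvRec) : Bool :=
  pvDupT x2 || (!(x2.length == 0) && decide (pvNom (PySem.List.pyGetD x2 (-1) pvDflt) > pvMaxPairCount))

def pvContrib (mul cost : Int) (x2 : List PvRec) : Int :=
  if x2.length = 0 then 0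
  else mul * (pvNom (PySem.List.pyGetD x2 (-1) pvDflt) - pvNom (PySem.List.pyGetD x2 0 pvDflt) + 1) ^ (2 : Nat) + cost

-- canonical form of B's per-bucket work
def pvBadB (noms : List Int) : Bool :=
  !(noms.isEmpty) && (decide (PySem.Set.len (PySem.Set.ofList noms) < (noms.length : Int))
    || decide ((PySem.List.max? noms (fun v => v)).getD 0 > pvMaxPairCount))

def pvContribB (mul cost : Int) (noms : List Int) : Int :=
  if noms.isEmpty then 0
  else mul * ((PySem.List.max? noms (fun v => v)).getD 0 - (PySem.List.min? noms (fun v => v)).getD 0 + 1) ^ (2 : Nat) + cost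

lemma stepT_shape (acc : Option Int) (x2 : List PvRec) :
    pvAStepT acc x2 = acc.bind (fun t => if pvBadT x2 = true then none
      else some (t + pvContrib pvTEACHER_MUL pvTEACHER_DAY x2)) := by
  cases acc with
  | none => rfl
  | some total =>
    simp only [pvAStepT, pvBadT, pvContrib, Option.bind_some]
    by_cases hdup : pvDupT x2 = true
    · simp [pvDupT] at hdup; simp [hdup, pvDupT]
    · simp only [Bool.not_eq_true] at hdup
      simp only [pvDupT] at hdup
      rw [hdup]
      by_cases hlen : x2.length = 0
      · simp [hlen, pvDupT, hdup]
      · by_cases hmax : pvNom (PySem.List.pyGetD x2 (-1) pvDflt) > pvMaxPairCount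
        · simp [hlen, hmax, pvDupT, hdup]
        · simp [hlen, hmax, pvDupT, hdup, Int.add_assoc]

lemma stepG_shape (acc : Option Int) (x2 : List PvRec) :
    pvAStepG acc x2 = acc.bind (fun t => if pvBadT x2 = true then none
      else some (t + pvContrib pvGROUP_MUL pvGROUP_DAY x2)) := by
  cases acc with
  | none => rfl
  | some total =>
    simp only [pvAStepG, pvBadT, pvContrib, Option.bind_some, Bool.false_or, Bool.and_self]
    by_cases hdup : pvDupT x2 = true
    · simp [pvDupT] at hdup; simp [hdup, pvDupT]
    · simp only [Bool.not_eq_true] at hdup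
      simp only [pvDupT] at hdup
      rw [hdup]
      by_cases hlen : x2.length = 0
      · simp [hlen, pvDupT, hdup]
      · by_cases hmax : pvNom (PySem.List.pyGetD x2 (-1) pvDflt) > pvMaxPairCount
        · simp [hlen, hmax, pvDupT, hdup]
        · simp [hlen, hmax, pvDupT, hdup, Int.add_assoc]

lemma bstep_shape (mul cost : Int) (st : Bool × Int) (noms : List Int) :
    pvBStep mul cost st noms = (st.1 || pvBadB noms, st.2 + pvContribB mul cost noms) := by
  cases noms with
  | nil => simp [pvBStep, pvBadB, pvContribB]
  | cons a t => simp [pvBStep, pvBadB, pvContribB, Int.add_assoc]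

lemma optfold_none {b : Type} (step : Option Int -> b -> Option Int)
    (hn : forall e, step none e = none) : forall l : List b, l.foldl step none = none := by
  intro l; induction l with
  | nil => rfl
  | cons e t ih => simp [List.foldl_cons, hn e, ih]

lemma optfold_bind {b : Type} (step : Option Int -> b -> Option Int) (bad : b -> Bool) (c : b -> Int)
    (hn : forall e, step none e = none)
    (h : forall t e, step (some t) e = if bad e = true then none else some (t + c e)) :
    forall (l : List b) (acc : Option Int),
      l.foldl step acc = acc.bind (fun t => if l.any bad = true then none else some (t + (l.map c).sum)) := by
  intro l
  induction l with
  | nil => intro acc; cases acc <;> simp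
  | cons e t ih =>
    intro acc
    cases acc with
    | none => simp [optfold_none step hn, List.foldl_cons, hn e]
    | some v =>
      rw [List.foldl_cons, h v e]
      by_cases he : bad e = true
      · simp [he, optfold_none step hn]
      · simp only [Bool.not_eq_true] at he
        rw [if_neg (by simp [he])]
        rw [ih (some (v + c e))]
        simp [he, Int.add_assoc]

lemma boolfold {b : Type} (step : Bool × Int -> b -> Bool × Int) (bad : b -> Bool) (c : b -> Int)
    (h : forall s e, step s e = (s.1 || bad e, s.2 + c e)) :
    forall (l : List b) (s0 : Bool × Int), l.foldl step s0 = (s0.1 || l.any bad, s0.2 + (l.map c).sum) := by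
  intro l
  induction l with
  | nil => intro s0; simp
  | cons e t ih =>
    intro s0
    simp only [List.foldl_cons, h s0 e, List.any_cons, List.map_cons, List.sum_cons]
    rw [ih]
    simp [Bool.or_assoc, Int.add_assoc]

lemma orfold {b : Type} (step : Bool -> b -> Bool) (p : b -> Bool)
    (h : forall s e, step s e = (s || p e)) :
    forall (l : List b) (s0 : Bool), l.foldl step s0 = (s0 || l.any p) := by
  intro l
  induction l with
  | nil => intro s0; simp
  | cons e t ih =>
    intro s0
    simp only [List.foldl_cons, h s0 e, List.any_cons]
    rw [ih]
    simp [Bool.or_assoc]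



lemma ds_split (x : List PvRec)
    (a : PySem.Dict (String × String) (List Int)) (b : PySem.Dict (String × String) (List Int))
    (c : PySem.Dict (String × Int) Int) (d : PySem.Dict (String × Int) Int) :
    x.foldl (fun st r => (pvStepTD st.1 r, pvStepGD st.2.1 r, pvStepNC st.2.2.1 r, pvStepALL st.2.2.2 r)) (a, b, c, d)
      = (x.foldl pvStepTD a, x.foldl pvStepGD b, x.foldl pvStepNC c, x.foldl pvStepALL d) := by
  induction x generalizing a b c d with
  | nil => rfl
  | cons r t ih => simp only [List.foldl_cons]; exact ih _ _ _ _

lemma td_getD (t d : String) : ∀ (x : List PvRec) (dic : PySem.Dict (String × String) (List Int)),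
    (x.foldl pvStepTD dic).getD (t, d) [] = dic.getD (t, d) [] ++
      ((x.filter (fun r => (pvTeachers.contains r.1 && pvDays.contains r.2.2.1) && (r.1 == t && r.2.2.1 == d))).map pvNom) := by
  intro x
  induction x with
  | nil => intro dic; simp
  | cons r xt ih =>
    intro dic
    rw [List.foldl_cons]
    by_cases hc : (pvTeachers.contains r.1 && pvDays.contains r.2.2.1) = true
    · have hstep : pvStepTD dic r = dic.modify (r.1, r.2.2.1) [] (fun l => l ++ [r.2.2.2]) := by
        unfold pvStepTD; rw [if_pos hc]
      by_cases hk : r.1 = t ∧ r.2.2.1 = d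
      · have hkeq : ((r.1, r.2.2.1) : String × String) = (t, d) := by rw [hk.1, hk.2]
        have hpred : ((pvTeachers.contains r.1 && pvDays.contains r.2.2.1) && (r.1 == t && r.2.2.1 == d)) = true := by
          rw [Bool.and_eq_true]; exact ⟨hc, by simp [hk.1, hk.2]⟩
        rw [hstep, ih, hkeq, PySem.Dict.getD_modify_self, List.filter_cons, if_pos hpred, List.map_cons]
        rw [List.append_assoc, List.singleton_append]
        rfl
      · have hkb : (r.1 == t && r.2.2.1 == d) = false := by
          rcases Decidable.not_and_iff_not_or_not.mp hk with h1 | h1 <;> simp [h1]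
        have hne : ((t, d) : String × String) ≠ (r.1, r.2.2.1) := by
          intro he
          apply hk
          rw [Prod.ext_iff] at he
          exact ⟨he.1.symm, he.2.symm⟩
        rw [hstep, ih, PySem.Dict.getD_modify_of_ne _ _ _ hne, List.filter_cons, if_neg (by simp [hkb])]
    · have hcf : (pvTeachers.contains r.1 && pvDays.contains r.2.2.1) = false := Bool.eq_false_iff.mpr hc
      have hstep : pvStepTD dic r = dic := by unfold pvStepTD; rw [if_neg hc]
      rw [hstep, ih, List.filter_cons, if_neg (by rw [hcf, Bool.false_and]; simp)]

lemma gfold_getD (g0 d0 dy : String) (c : String -> Bool) (v : Int) :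
    ∀ (gs : List String), gs.Nodup → ∀ (dic : PySem.Dict (String × String) (List Int)),
      (gs.foldl (fun dd g => if c g = true then dd.modify (g, dy) [] (fun l => l ++ [v]) else dd) dic).getD (g0, d0) []
        = dic.getD (g0, d0) [] ++ (if g0 ∈ gs ∧ c g0 = true ∧ dy = d0 then [v] else []) := by
  intro gs
  induction gs with
  | nil => intro _ dic; simp
  | cons g gt ih =>
    intro hnd dic
    have hg_notmem : g ∉ gt := (List.nodup_cons.mp hnd).1
    have hnd' : gt.Nodup := (List.nodup_cons.mp hnd).2
    rw [List.foldl_cons]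
    by_cases hcg : c g = true
    · rw [if_pos hcg, ih hnd']
      by_cases hk : g = g0 ∧ dy = d0
      · have hkeq : ((g, dy) : String × String) = (g0, d0) := by simp [Prod.ext_iff, hk.1, hk.2]
        rw [hkeq, PySem.Dict.getD_modify_self]
        have hmem : ¬ (g0 ∈ gt ∧ c g0 = true ∧ dy = d0) := by
          rintro ⟨hm, -, -⟩; exact hg_notmem (hk.1 ▸ hm)
        have hcons : (g0 ∈ g :: gt ∧ c g0 = true ∧ dy = d0) := by
          refine ⟨by simp [hk.1], ?_, hk.2⟩
          rw [← hk.1]; exact hcg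
        rw [if_neg hmem, if_pos hcons]
        simp
      · rw [PySem.Dict.getD_modify_of_ne _ _ _ (by simp [Prod.ext_iff]; tauto)]
        have hiff : (g0 ∈ g :: gt ∧ c g0 = true ∧ dy = d0) ↔ (g0 ∈ gt ∧ c g0 = true ∧ dy = d0) := by
          constructor
          · rintro ⟨hm, h1, h2⟩
            rcases List.mem_cons.mp hm with he | hm'
            · exact absurd ⟨he.symm, h2⟩ hk
            · exact ⟨hm', h1, h2⟩
          · rintro ⟨hm, h1, h2⟩; exact ⟨List.mem_cons_of_mem _ hm, h1, h2⟩
        rw [if_congr hiff rfl rfl]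
    · rw [if_neg hcg, ih hnd']
      have hiff : (g0 ∈ g :: gt ∧ c g0 = true ∧ dy = d0) ↔ (g0 ∈ gt ∧ c g0 = true ∧ dy = d0) := by
        constructor
        · rintro ⟨hm, h1, h2⟩
          rcases List.mem_cons.mp hm with he | hm'
          · exact absurd (he ▸ h1) hcg
          · exact ⟨hm', h1, h2⟩
        · rintro ⟨hm, h1, h2⟩; exact ⟨List.mem_cons_of_mem _ hm, h1, h2⟩
      rw [if_congr hiff rfl rfl]

lemma gd_getD (g0 d0 : String) (hg : g0 ∈ pvGroups) : ∀ (x : List PvRec) (dic : PySem.Dict (String × String) (List Int)),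
    (x.foldl pvStepGD dic).getD (g0, d0) [] = dic.getD (g0, d0) [] ++
      ((x.filter (fun r => (PySem.Str.isIn g0 r.2.1 && pvDays.contains r.2.2.1) && r.2.2.1 == d0)).map pvNom) := by
  intro x
  induction x with
  | nil => intro dic; simp
  | cons r xt ih =>
    intro dic
    rw [List.foldl_cons, List.filter_cons]
    have hstep : pvStepGD dic r =
        pvGroups.foldl (fun dd g => if (PySem.Str.isIn g r.2.1 && pvDays.contains r.2.2.1) = true
          then dd.modify (g, r.2.2.1) [] (fun l => l ++ [r.2.2.2]) else dd) dic := rfl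
    rw [hstep, ih]
    rw [gfold_getD g0 d0 r.2.2.1 (fun g => PySem.Str.isIn g r.2.1 && pvDays.contains r.2.2.1) r.2.2.2 pvGroups (by decide) dic]
    by_cases hcond : ((PySem.Str.isIn g0 r.2.1 && pvDays.contains r.2.2.1) && r.2.2.1 == d0) = true
    · have h1 : (PySem.Str.isIn g0 r.2.1 && pvDays.contains r.2.2.1) = true := by
        simp at hcond; simp [hcond.1]
      have h2 : r.2.2.1 = d0 := by simp at hcond; exact hcond.2
      rw [if_pos ⟨hg, h1, h2⟩, if_pos hcond]
      simp [pvNom]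
    · have : ¬ (g0 ∈ pvGroups ∧ (PySem.Str.isIn g0 r.2.1 && pvDays.contains r.2.2.1) = true ∧ r.2.2.1 = d0) := by
        rintro ⟨-, h1, h2⟩
        exact hcond (by simp_all)
      rw [if_neg this, if_neg (by simpa using hcond)]
      simp

lemma cfold_getD (step : PySem.Dict (String × Int) Int -> PvRec -> PySem.Dict (String × Int) Int) (c : PvRec -> Bool)
    (h : ∀ dd r, step dd r = if c r = true then dd.insert (r.2.2.1, r.2.2.2) (dd.getD (r.2.2.1, r.2.2.2) 0 + 1) else dd)
    (dy : String) (n : Int) :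
    ∀ (x : List PvRec) (dic : PySem.Dict (String × Int) Int),
      (x.foldl step dic).getD (dy, n) 0 = dic.getD (dy, n) 0 +
        ((x.filter (fun r => c r && (r.2.2.1 == dy && r.2.2.2 == n))).length : Int) := by
  intro x
  induction x with
  | nil => intro dic; simp
  | cons r xt ih =>
    intro dic
    rw [List.foldl_cons, List.filter_cons, h dic r]
    by_cases hc : c r = true
    · by_cases hk : r.2.2.1 = dy ∧ r.2.2.2 = n
      · have hkeq : ((r.2.2.1, r.2.2.2) : String × Int) = (dy, n) := by simp [Prod.ext_iff, hk.1, hk.2]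
        rw [if_pos hc, ih]
        rw [hkeq, PySem.Dict.getD_insert_self]
        have : (c r && (r.2.2.1 == dy && r.2.2.2 == n)) = true := by simp [hc, hk.1, hk.2]
        rw [this]
        simp only [if_true, List.length_cons]
        push_cast
        ring
      · have hkb : (r.2.2.1 == dy && r.2.2.2 == n) = false := by
          rcases Decidable.not_and_iff_not_or_not.mp hk with h1 | h1 <;> simp [h1]
        rw [if_pos hc, ih]
        rw [PySem.Dict.getD_insert_of_ne _ _ _ (by simp [Prod.ext_iff]; tauto)]
        simp [hkb]
    · simp only [Bool.not_eq_true] at hc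
      rw [if_neg (by simp [hc]), ih]
      simp [hc]


lemma pyGetD_neg_one {α : Type} (s : List α) (h : s ≠ []) (d : α) :
    PySem.List.pyGetD s (-1) d = s[s.length - 1]'(by have := List.length_pos_iff.mpr h; omega) := by
  have hl : 0 < s.length := List.length_pos_iff.mpr h
  rw [PySem.List.pyGetD, PySem.List.pyGet?, PySem.List.pyIdx?]
  rw [if_neg (by omega), if_pos (by omega)]
  have h1 : ((-(-1 : Int)).toNat) = 1 := by decide
  rw [h1]
  simp [List.getElem?_eq_getElem (show s.length - 1 < s.length by omega)]

lemma setlen_lt_iff (ns : List Int) :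
    (PySem.Set.len (PySem.Set.ofList ns) < (ns.length : Int)) ↔ ¬ ns.Nodup := by
  have key : ∀ m : List Int, (PySem.Set.ofList m).length ≤ m.length ∧
      ((PySem.Set.ofList m).length = m.length ↔ m.Nodup) := by
    intro m
    induction m using List.reverseRecOn with
    | nil => simp [PySem.Set.ofList_eq_foldl]
    | append_singleton xs a ih =>
      have hsnoc : PySem.Set.ofList (xs ++ [a]) = PySem.Set.add (PySem.Set.ofList xs) a := by
        rw [PySem.Set.ofList_eq_foldl, PySem.Set.ofList_eq_foldl, List.foldl_append]
        rfl
      by_cases hmem : a ∈ xs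
      · have hcont : (PySem.Set.ofList xs).contains a = true := by
          rw [PySem.Set.contains, List.contains_iff_mem, PySem.Set.mem_ofList]; exact hmem
        have heq : PySem.Set.ofList (xs ++ [a]) = PySem.Set.ofList xs := by
          rw [hsnoc, PySem.Set.add, if_pos hcont]
        rw [heq]
        have hnotnd : ¬ (xs ++ [a]).Nodup := by
          simp [List.nodup_append]
          intro _; exact hmem
        constructor
        · simp; omega
        · simp only [List.length_append, List.length_cons, List.length_nil]
          constructor
          · intro hlen; exfalso; omega
          · intro hnd; exact absurd hnd hnotnd
      · have hcont : (PySem.Set.ofList xs).contains a = false := by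
          rw [PySem.Set.contains]
          rw [Bool.eq_false_iff]
          intro hc
          exact hmem (PySem.Set.mem_ofList xs a |>.mp (List.contains_iff_mem.mp hc))
        have heq : PySem.Set.ofList (xs ++ [a]) = PySem.Set.ofList xs ++ [a] := by
          rw [hsnoc, PySem.Set.add, if_neg (by rw [hcont]; simp)]
        rw [heq]
        have hnd : (xs ++ [a]).Nodup ↔ xs.Nodup := by
          simp [List.nodup_append]
          intro _ b hb hba
          exact hmem (hba ▸ hb)
        simp only [List.length_append, List.length_cons, List.length_nil]
        constructor
        · omega
        · rw [hnd]
          constructor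
          · intro hlen; exact ih.2.mp (by omega)
          · intro hn; have := ih.2.mpr hn; omega
  rw [PySem.Set.len]
  constructor
  · intro hlt hnd
    have := (key ns).2.mpr hnd
    omega
  · intro hnd
    have h1 := (key ns).1
    have h2 : (PySem.Set.ofList ns).length ≠ ns.length := fun he => hnd ((key ns).2.mp he)
    omega

lemma exists_adj (l : List PvRec) (p q : Nat) (hpq : p < q) (hq : q < (PySem.List.sorted l pvNom).length)
    (he : pvNom ((PySem.List.sorted l pvNom)[p]'(by omega)) = pvNom ((PySem.List.sorted l pvNom)[q]'hq)) :
    pvNom ((PySem.List.sorted l pvNom)[p + 1]'(by omega)) = pvNom ((PySem.List.sorted l pvNom)[p]'(by omega)) := by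
  have h1 := PySem.List.key_sorted_getElem_mono l pvNom (show p ≤ p + 1 by omega) (show p + 1 < (PySem.List.sorted l pvNom).length by omega)
  have h2 := PySem.List.key_sorted_getElem_mono l pvNom (show p + 1 ≤ q by omega) hq
  omega

lemma dupT_iff (l : List PvRec) : pvDupT (PySem.List.sorted l pvNom) = true ↔ ¬ (l.map pvNom).Nodup := by
  have hperm : ((PySem.List.sorted l pvNom).map pvNom).Perm (l.map pvNom) :=
    (PySem.List.sorted_perm l pvNom false).map pvNom
  have hsl : (PySem.List.sorted l pvNom).length = l.length := (PySem.List.sorted_perm l pvNom false).length_eq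
  rw [pvDupT, List.any_eq_true]
  constructor
  · rintro ⟨i, hi, hb⟩
    rw [PySem.List.mem_pyRange_one] at hi
    intro hnd
    have hnds : ((PySem.List.sorted l pvNom).map pvNom).Nodup := hperm.nodup_iff.mpr hnd
    rw [PySem.List.pyGetD_eq_getElem _ pvDflt (by omega) hi.2,
        PySem.List.pyGetD_eq_getElem _ pvDflt (by omega) (by omega)] at hb
    have heq : pvNom ((PySem.List.sorted l pvNom)[i.toNat]'(by omega)) =
        pvNom ((PySem.List.sorted l pvNom)[(i - 1).toNat]'(by omega)) := beq_iff_eq.mp hb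
    have hmap : ((PySem.List.sorted l pvNom).map pvNom)[i.toNat]'(by simp; omega) =
        ((PySem.List.sorted l pvNom).map pvNom)[(i - 1).toNat]'(by simp; omega) := by
      simp only [List.getElem_map]
      exact heq
    have hij := (List.Nodup.getElem_inj_iff hnds).mp hmap
    omega
  · intro hnd
    have hnds : ¬ ((PySem.List.sorted l pvNom).map pvNom).Nodup := fun hn => hnd (hperm.nodup_iff.mp hn)
    rw [List.nodup_iff_injective_get, Function.Injective] at hnds
    push_neg at hnds
    obtain ⟨⟨p, hp⟩, ⟨q, hq⟩, heq, hne⟩ := hnds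
    simp only [List.get_eq_getElem, List.getElem_map, List.length_map] at heq hp hq
    have hne' : p ≠ q := by simpa [Fin.ext_iff] using hne
    rcases Nat.lt_or_ge p q with hlt | hge
    · have hadj := exists_adj l p q hlt hq heq
      refine ⟨(p : Int) + 1, ?_, ?_⟩
      · rw [PySem.List.mem_pyRange_one]; omega
      · rw [PySem.List.pyGetD_eq_getElem _ pvDflt (by omega) (by omega),
            PySem.List.pyGetD_eq_getElem _ pvDflt (by omega) (by omega)]
        rw [beq_iff_eq]
        have e1 : ((p : Int) + 1).toNat = p + 1 := by omega
        have e2 : ((p : Int) + 1 - 1).toNat = p := by omega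
        simp only [e1, e2]
        exact hadj
    · have hlt : q < p := by omega
      have hadj := exists_adj l q p hlt hp heq.symm
      refine ⟨(q : Int) + 1, ?_, ?_⟩
      · rw [PySem.List.mem_pyRange_one]; omega
      · rw [PySem.List.pyGetD_eq_getElem _ pvDflt (by omega) (by omega),
            PySem.List.pyGetD_eq_getElem _ pvDflt (by omega) (by omega)]
        rw [beq_iff_eq]
        have e1 : ((q : Int) + 1).toNat = q + 1 := by omega
        have e2 : ((q : Int) + 1 - 1).toNat = q := by omega
        simp only [e1, e2]
        exact hadj

lemma last_eq_max (l : List PvRec) (hl : l ≠ []) :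
    pvNom (PySem.List.pyGetD (PySem.List.sorted l pvNom) (-1) pvDflt)
      = (PySem.List.max? (l.map pvNom) (fun v => v)).getD 0 := by
  have hs : PySem.List.sorted l pvNom ≠ [] := by
    rw [Ne, PySem.List.sorted_eq_nil_iff]; exact hl
  have hperm : ((PySem.List.sorted l pvNom).map pvNom).Perm (l.map pvNom) :=
    (PySem.List.sorted_perm l pvNom false).map pvNom
  have hlen : 0 < (PySem.List.sorted l pvNom).length := List.length_pos_iff.mpr hs
  rw [pyGetD_neg_one _ hs]
  cases hmax : PySem.List.max? (l.map pvNom) (fun v => v) with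
  | none =>
    exfalso
    rw [PySem.List.max?_eq_none_iff] at hmax
    simp [hl] at hmax
  | some m =>
    have hmem := PySem.List.max?_mem hmax
    have hall := PySem.List.max?_isMax hmax
    simp only [Option.getD_some]
    have hsl : (PySem.List.sorted l pvNom).length = l.length := (PySem.List.sorted_perm l pvNom false).length_eq
    have hlmem : (PySem.List.sorted l pvNom)[(PySem.List.sorted l pvNom).length - 1]'(by omega) ∈ PySem.List.sorted l pvNom :=
      List.getElem_mem _
    have hlastmem : pvNom ((PySem.List.sorted l pvNom)[(PySem.List.sorted l pvNom).length - 1]'(by omega)) ∈ l.map pvNom :=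
      hperm.mem_iff.mp (List.mem_map_of_mem hlmem)
    have hle1 : pvNom ((PySem.List.sorted l pvNom)[(PySem.List.sorted l pvNom).length - 1]'(by omega)) ≤ m := by
      simpa using hall _ hlastmem
    have hmem' : m ∈ (PySem.List.sorted l pvNom).map pvNom := hperm.mem_iff.mpr hmem
    obtain ⟨k, hk, hkm⟩ := List.mem_iff_getElem.mp hmem'
    simp only [List.length_map] at hk
    rw [List.getElem_map] at hkm
    have hle2 : m ≤ pvNom ((PySem.List.sorted l pvNom)[(PySem.List.sorted l pvNom).length - 1]'(by omega)) := by
      rw [← hkm]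
      exact PySem.List.key_sorted_getElem_mono l pvNom (show k ≤ (PySem.List.sorted l pvNom).length - 1 by omega) (by omega)
    omega


lemma first_eq_min (l : List PvRec) (hl : l ≠ []) :
    pvNom (PySem.List.pyGetD (PySem.List.sorted l pvNom) 0 pvDflt)
      = (PySem.List.min? (l.map pvNom) (fun v => v)).getD 0 := by
  have hs : PySem.List.sorted l pvNom ≠ [] := by
    rw [Ne, PySem.List.sorted_eq_nil_iff]; exact hl
  have hperm : ((PySem.List.sorted l pvNom).map pvNom).Perm (l.map pvNom) :=
    (PySem.List.sorted_perm l pvNom false).map pvNom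
  have hlen : 0 < (PySem.List.sorted l pvNom).length := List.length_pos_iff.mpr hs
  rw [PySem.List.pyGetD_eq_getElem _ pvDflt (by omega) (by exact_mod_cast hlen)]
  cases hmin : PySem.List.min? (l.map pvNom) (fun v => v) with
  | none =>
    exfalso
    rw [PySem.List.min?_eq_none_iff] at hmin
    simp [hl] at hmin
  | some m =>
    have hmem := PySem.List.min?_mem hmin
    have hall := PySem.List.min?_isMin hmin
    simp only [Option.getD_some, Int.toNat_zero]
    have h0mem : (PySem.List.sorted l pvNom)[0]'hlen ∈ PySem.List.sorted l pvNom := List.getElem_mem _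
    have hfirstmem : pvNom ((PySem.List.sorted l pvNom)[0]'hlen) ∈ l.map pvNom :=
      hperm.mem_iff.mp (List.mem_map_of_mem h0mem)
    have hle1 : m ≤ pvNom ((PySem.List.sorted l pvNom)[0]'hlen) := by
      simpa using hall _ hfirstmem
    have hmem' : m ∈ (PySem.List.sorted l pvNom).map pvNom := hperm.mem_iff.mpr hmem
    obtain ⟨k, hk, hkm⟩ := List.mem_iff_getElem.mp hmem'
    simp only [List.length_map] at hk
    rw [List.getElem_map] at hkm
    have hle2 : pvNom ((PySem.List.sorted l pvNom)[0]'hlen) ≤ m := by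
      rw [← hkm]
      exact PySem.List.key_sorted_getElem_mono l pvNom (Nat.zero_le k) hk
    omega

lemma badT_eq (l : List PvRec) : pvBadT (PySem.List.sorted l pvNom) = pvBadB (l.map pvNom) := by
  by_cases hl : l = []
  · subst hl; rfl
  · have hs : PySem.List.sorted l pvNom ≠ [] := by
      rw [Ne, PySem.List.sorted_eq_nil_iff]; exact hl
    have hsl : (PySem.List.sorted l pvNom).length = l.length := (PySem.List.sorted_perm l pvNom false).length_eq
    have hlen : 0 < (PySem.List.sorted l pvNom).length := List.length_pos_iff.mpr hs
    have hne : (l.map pvNom).isEmpty = false := by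
      simp [List.isEmpty_eq_false_iff, hl]
    rw [pvBadT, pvBadB, hne]
    have hlenb : ((PySem.List.sorted l pvNom).length == 0) = false := by
      simp; omega
    rw [hlenb]
    simp only [Bool.not_false, Bool.true_and]
    have hdup : pvDupT (PySem.List.sorted l pvNom)
        = decide (PySem.Set.len (PySem.Set.ofList (l.map pvNom)) < ((l.map pvNom).length : Int)) := by
      apply Bool.coe_iff_coe.mp
      rw [dupT_iff l, decide_eq_true_iff, setlen_lt_iff]
    rw [hdup, last_eq_max l hl]

lemma contrib_eq (mul cost : Int) (l : List PvRec) :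
    pvContrib mul cost (PySem.List.sorted l pvNom) = pvContribB mul cost (l.map pvNom) := by
  by_cases hl : l = []
  · subst hl; rfl
  · have hs : PySem.List.sorted l pvNom ≠ [] := by
      rw [Ne, PySem.List.sorted_eq_nil_iff]; exact hl
    have hlen : 0 < (PySem.List.sorted l pvNom).length := List.length_pos_iff.mpr hs
    have hne : (l.map pvNom).isEmpty = false := by
      simp [List.isEmpty_eq_false_iff, hl]
    rw [pvContrib, pvContribB, if_neg (by omega), if_neg (by simp [hne])]
    rw [last_eq_max l hl, first_eq_min l hl]

-- canonical bucket lists and counts (A's filters, fused)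
def pvTDlist (x : List PvRec) (t d : String) : List PvRec :=
  (x.filter (fun xval => xval.1 == t)).filter (fun xval => xval.2.2.1 == d)

def pvGDlist (x : List PvRec) (g d : String) : List PvRec :=
  (x.filter (fun xval => PySem.Str.isIn g xval.2.1)).filter (fun xval => xval.2.2.1 == d)

def pvCnt1 (x : List PvRec) (day : String) (nom : Int) : Int :=
  ((x.filter (fun val => val.2.2.2 == nom && val.2.2.1 == day && !(PySem.Str.isIn ":" val.2.1))).length : Int)

def pvCnt2 (x : List PvRec) (day : String) (nom : Int) : Int :=
  ((x.filter (fun val => val.2.2.2 == nom && val.2.2.1 == day)).length : Int)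

def pvAnyT (x : List PvRec) : Bool :=
  pvTeachers.any (fun t => pvDays.any (fun d => pvBadB ((pvTDlist x t d).map pvNom)))

def pvAnyG (x : List PvRec) : Bool :=
  pvGroups.any (fun g => pvDays.any (fun d => pvBadB ((pvGDlist x g d).map pvNom)))

def pvAnyN (x : List PvRec) : Bool :=
  pvDays.any (fun day => (PySem.List.pyRange 0 pvMaxPairCount 1).any (fun nom =>
    decide (pvCnt1 x day nom > pvLARGE_COUNT) || decide (pvCnt2 x day nom > (pvAud.length : Int))))

def pvSumT (x : List PvRec) : Int :=
  (pvTeachers.map (fun t => (pvDays.map (fun d =>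
    pvContribB pvTEACHER_MUL pvTEACHER_DAY ((pvTDlist x t d).map pvNom))).sum)).sum

def pvSumG (x : List PvRec) : Int :=
  (pvGroups.map (fun g => (pvDays.map (fun d =>
    pvContribB pvGROUP_MUL pvGROUP_DAY ((pvGDlist x g d).map pvNom))).sum)).sum

def pvCanon (x : List PvRec) : Int :=
  if (pvAnyT x || (pvAnyG x || pvAnyN x)) = true then pvINF else pvSumT x + pvSumG x

lemma A_eq_canon (x : List PvRec) : evaluate x = pvCanon x := by
  have hT : pvTeachers.foldl (fun acc teacher =>
      pvDays.foldl (fun acc day =>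
        pvAStepT acc (PySem.List.sorted ((x.filter (fun xval => xval.1 == teacher)).filter (fun xval => xval.2.2.1 == day)) pvNom)) acc) (some 0)
      = (some (0 : Int)).bind (fun v => if pvAnyT x = true then none else some (v + pvSumT x)) := by
    rw [optfold_bind _
      (fun t => pvDays.any (fun d => pvBadT (PySem.List.sorted (pvTDlist x t d) pvNom)))
      (fun t => (pvDays.map (fun d => pvContrib pvTEACHER_MUL pvTEACHER_DAY (PySem.List.sorted (pvTDlist x t d) pvNom))).sum)
      (fun e => optfold_none _ (fun z => rfl) pvDays)
      (fun v e => by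
        rw [optfold_bind _ (fun d => pvBadT (PySem.List.sorted (pvTDlist x e d) pvNom))
          (fun d => pvContrib pvTEACHER_MUL pvTEACHER_DAY (PySem.List.sorted (pvTDlist x e d) pvNom))
          (fun z => rfl) (fun w z => by rw [stepT_shape]; rfl) pvDays (some v)]
        rfl)
      pvTeachers (some 0)]
    simp only [pvAnyT, pvSumT, badT_eq, contrib_eq]
  have hG : ∀ acc : Option Int, pvGroups.foldl (fun acc group =>
      pvDays.foldl (fun acc day =>
        pvAStepG acc (PySem.List.sorted ((x.filter (fun xval => PySem.Str.isIn group xval.2.1)).filter (fun xval => xval.2.2.1 == day)) pvNom)) acc) acc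
      = acc.bind (fun v => if pvAnyG x = true then none else some (v + pvSumG x)) := by
    intro acc
    rw [optfold_bind _
      (fun g => pvDays.any (fun d => pvBadT (PySem.List.sorted (pvGDlist x g d) pvNom)))
      (fun g => (pvDays.map (fun d => pvContrib pvGROUP_MUL pvGROUP_DAY (PySem.List.sorted (pvGDlist x g d) pvNom))).sum)
      (fun e => optfold_none _ (fun z => rfl) pvDays)
      (fun v e => by
        rw [optfold_bind _ (fun d => pvBadT (PySem.List.sorted (pvGDlist x e d) pvNom))
          (fun d => pvContrib pvGROUP_MUL pvGROUP_DAY (PySem.List.sorted (pvGDlist x e d) pvNom))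
          (fun z => rfl) (fun w z => by rw [stepG_shape]; rfl) pvDays (some v)]
        rfl)
      pvGroups acc]
    simp only [pvAnyG, pvSumG, badT_eq, contrib_eq]
  have hN : ∀ acc : Option Int, pvDays.foldl (fun acc day =>
      (PySem.List.pyRange 0 pvMaxPairCount 1).foldl (fun acc nom =>
        match acc with
        | none => none
        | some total =>
          if ((x.filter (fun val => val.2.2.2 == nom && val.2.2.1 == day && !(PySem.Str.isIn ":" val.2.1))).length : Int) > pvLARGE_COUNT then none
          else if ((x.filter (fun val => val.2.2.2 == nom && val.2.2.1 == day)).length : Int) > (pvAud.length : Int) then none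
          else some total) acc) acc
      = acc.bind (fun v => if pvAnyN x = true then none else some v) := by
    intro acc
    rw [optfold_bind _
      (fun day => (PySem.List.pyRange 0 pvMaxPairCount 1).any (fun nom =>
        decide (pvCnt1 x day nom > pvLARGE_COUNT) || decide (pvCnt2 x day nom > (pvAud.length : Int))))
      (fun _ => (0 : Int))
      (fun e => optfold_none _ (fun z => rfl) (PySem.List.pyRange 0 pvMaxPairCount 1))
      (fun v e => by
        rw [optfold_bind _ (fun nom => decide (pvCnt1 x e nom > pvLARGE_COUNT) || decide (pvCnt2 x e nom > (pvAud.length : Int)))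
          (fun _ => (0 : Int))
          (fun z => rfl)
          (fun w z => by
            show (if pvCnt1 x e z > pvLARGE_COUNT then none
                  else if pvCnt2 x e z > (pvAud.length : Int) then none else some w) = _
            by_cases h1 : pvCnt1 x e z > pvLARGE_COUNT
            · simp [h1]
            · by_cases h2 : pvCnt2 x e z > (pvAud.length : Int)
              · simp [h1, h2]
              · simp [h1, h2])
          (PySem.List.pyRange 0 pvMaxPairCount 1) (some v)]
        simp)
      pvDays acc]
    simp only [pvAnyN]
    congr 1
    funext v
    simp
  show (match pvDays.foldl _ (pvGroups.foldl _ (pvTeachers.foldl _ (some 0))) with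
        | none => pvINF
        | some total => total) = pvCanon x
  rw [hT]
  simp only [Option.bind_some]
  rw [hG, hN]
  by_cases h1 : pvAnyT x = true <;> by_cases h2 : pvAnyG x = true <;> by_cases h3 : pvAnyN x = true <;>
    simp [pvCanon, h1, h2, h3, Int.add_assoc]

def pvTdDict (x : List PvRec) : PySem.Dict (String × String) (List Int) := x.foldl pvStepTD PySem.Dict.empty
def pvGdDict (x : List PvRec) : PySem.Dict (String × String) (List Int) := x.foldl pvStepGD PySem.Dict.empty
def pvNcDict (x : List PvRec) : PySem.Dict (String × Int) Int := x.foldl pvStepNC PySem.Dict.empty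
def pvAllDict (x : List PvRec) : PySem.Dict (String × Int) Int := x.foldl pvStepALL PySem.Dict.empty

lemma td_bucket (x : List PvRec) (t d : String) (ht : t ∈ pvTeachers) (hd : d ∈ pvDays) :
    (pvTdDict x).getD (t, d) [] = (pvTDlist x t d).map pvNom := by
  rw [pvTdDict, td_getD, PySem.Dict.getD_empty]
  rw [List.nil_append]
  congr 1
  rw [pvTDlist, List.filter_filter]
  apply List.filter_congr
  intro r _
  by_cases h1 : r.1 = t
  · by_cases h2 : r.2.2.1 = d
    · simp [beq_iff_eq, h1, h2, List.contains_iff_mem, ht, hd]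
    · have e2 : (r.2.2.1 == d) = false := beq_eq_false_iff_ne.mpr h2
      simp [e2]
  · have e1 : (r.1 == t) = false := beq_eq_false_iff_ne.mpr h1
    simp [e1]

lemma gd_bucket (x : List PvRec) (g d : String) (hg : g ∈ pvGroups) (hd : d ∈ pvDays) :
    (pvGdDict x).getD (g, d) [] = (pvGDlist x g d).map pvNom := by
  rw [pvGdDict, gd_getD g d hg, PySem.Dict.getD_empty]
  rw [List.nil_append]
  congr 1
  rw [pvGDlist, List.filter_filter]
  apply List.filter_congr
  intro r _
  by_cases h2 : r.2.2.1 = d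
  · cases hi : PySem.Str.isIn g r.2.1 <;> simp [beq_iff_eq, h2, hi, List.contains_iff_mem, hd]
  · have e2 : (r.2.2.1 == d) = false := beq_eq_false_iff_ne.mpr h2
    simp [e2]

lemma nc_getD (x : List PvRec) (d : String) (n : Int) (hd : d ∈ pvDays) (h0 : 0 ≤ n) (h4 : n < pvMaxPairCount) :
    (pvNcDict x).getD (d, n) 0 = pvCnt1 x d n := by
  rw [pvNcDict, cfold_getD pvStepNC
    (fun r => (pvDays.contains r.2.2.1 && (decide (0 ≤ r.2.2.2) && decide (r.2.2.2 < pvMaxPairCount))) && !(PySem.Str.isIn ":" r.2.1))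
    (fun dd r => rfl) d n, PySem.Dict.getD_empty, Int.zero_add, pvCnt1]
  congr 2
  apply List.filter_congr
  intro r _
  by_cases h1 : r.2.2.2 = n
  · by_cases h2 : r.2.2.1 = d
    · cases hi : PySem.Str.isIn ":" r.2.1 <;>
        simp [beq_iff_eq, h1, h2, hi, List.contains_iff_mem, hd, h0, h4]
    · have e2 : (r.2.2.1 == d) = false := beq_eq_false_iff_ne.mpr h2
      simp [e2]
  · have e1 : (r.2.2.2 == n) = false := beq_eq_false_iff_ne.mpr h1
    simp [e1]

lemma all_getD (x : List PvRec) (d : String) (n : Int) (hd : d ∈ pvDays) (h0 : 0 ≤ n) (h4 : n < pvMaxPairCount) :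
    (pvAllDict x).getD (d, n) 0 = pvCnt2 x d n := by
  rw [pvAllDict, cfold_getD pvStepALL
    (fun r => pvDays.contains r.2.2.1 && (decide (0 ≤ r.2.2.2) && decide (r.2.2.2 < pvMaxPairCount)))
    (fun dd r => rfl) d n, PySem.Dict.getD_empty, Int.zero_add, pvCnt2]
  congr 2
  apply List.filter_congr
  intro r _
  by_cases h1 : r.2.2.2 = n
  · by_cases h2 : r.2.2.1 = d
    · simp [beq_iff_eq, h1, h2, List.contains_iff_mem, hd, h0, h4]
    · have e2 : (r.2.2.1 == d) = false := beq_eq_false_iff_ne.mpr h2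
      simp [e2]
  · have e1 : (r.2.2.2 == n) = false := beq_eq_false_iff_ne.mpr h1
    simp [e1]

lemma B_unfold (x : List PvRec) : evaluate_alt x =
    (if (pvDays.foldl (fun b d => (PySem.List.pyRange 0 pvMaxPairCount 1).foldl (fun b n =>
          b || (decide ((pvNcDict x).getD (d, n) 0 > pvLARGE_COUNT)
            || decide ((pvAllDict x).getD (d, n) 0 > (pvAud.length : Int)))) b)
          ((pvGroups.foldl (fun st g => pvDays.foldl (fun st d =>
              pvBStep pvGROUP_MUL pvGROUP_DAY st ((pvGdDict x).getD (g, d) [])) st)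
            (pvTeachers.foldl (fun st t => pvDays.foldl (fun st d =>
              pvBStep pvTEACHER_MUL pvTEACHER_DAY st ((pvTdDict x).getD (t, d) [])) st) (false, 0))).1)) = true
     then pvINF
     else (pvGroups.foldl (fun st g => pvDays.foldl (fun st d =>
              pvBStep pvGROUP_MUL pvGROUP_DAY st ((pvGdDict x).getD (g, d) [])) st)
            (pvTeachers.foldl (fun st t => pvDays.foldl (fun st d =>
              pvBStep pvTEACHER_MUL pvTEACHER_DAY st ((pvTdDict x).getD (t, d) [])) st) (false, 0))).2) := by
  unfold evaluate_alt
  rw [ds_split]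
  rfl

lemma B_eq_canon (x : List PvRec) : evaluate_alt x = pvCanon x := by
  rw [B_unfold]
  have h1 : pvTeachers.foldl (fun st t => pvDays.foldl (fun st d =>
      pvBStep pvTEACHER_MUL pvTEACHER_DAY st ((pvTdDict x).getD (t, d) [])) st) ((false, 0) : Bool × Int)
      = (false || pvAnyT x, 0 + pvSumT x) := by
    rw [boolfold _
      (fun t => pvDays.any (fun d => pvBadB ((pvTdDict x).getD (t, d) [])))
      (fun t => (pvDays.map (fun d => pvContribB pvTEACHER_MUL pvTEACHER_DAY ((pvTdDict x).getD (t, d) []))).sum)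
      (fun s e => by
        rw [boolfold _ (fun d => pvBadB ((pvTdDict x).getD (e, d) []))
          (fun d => pvContribB pvTEACHER_MUL pvTEACHER_DAY ((pvTdDict x).getD (e, d) []))
          (fun s2 e2 => bstep_shape _ _ _ _) pvDays s])
      pvTeachers (false, 0)]
    have hb : pvTeachers.any (fun t => pvDays.any (fun d => pvBadB ((pvTdDict x).getD (t, d) []))) = pvAnyT x := by
      rw [pvAnyT]
      apply PySem.List.any_congr_mem
      intro t ht
      apply PySem.List.any_congr_mem
      intro d hd
      rw [td_bucket x t d ht hd]
    have hs : (pvTeachers.map (fun t => (pvDays.map (fun d =>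
        pvContribB pvTEACHER_MUL pvTEACHER_DAY ((pvTdDict x).getD (t, d) []))).sum)).sum = pvSumT x := by
      rw [pvSumT]
      congr 1
      apply List.map_congr_left
      intro t ht
      congr 1
      apply List.map_congr_left
      intro d hd
      rw [td_bucket x t d ht hd]
    rw [hb, hs]
  have h2 : ∀ s0 : Bool × Int, pvGroups.foldl (fun st g => pvDays.foldl (fun st d =>
      pvBStep pvGROUP_MUL pvGROUP_DAY st ((pvGdDict x).getD (g, d) [])) st) s0
      = (s0.1 || pvAnyG x, s0.2 + pvSumG x) := by
    intro s0
    rw [boolfold _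
      (fun g => pvDays.any (fun d => pvBadB ((pvGdDict x).getD (g, d) [])))
      (fun g => (pvDays.map (fun d => pvContribB pvGROUP_MUL pvGROUP_DAY ((pvGdDict x).getD (g, d) []))).sum)
      (fun s e => by
        rw [boolfold _ (fun d => pvBadB ((pvGdDict x).getD (e, d) []))
          (fun d => pvContribB pvGROUP_MUL pvGROUP_DAY ((pvGdDict x).getD (e, d) []))
          (fun s2 e2 => bstep_shape _ _ _ _) pvDays s])
      pvGroups s0]
    have hb : pvGroups.any (fun g => pvDays.any (fun d => pvBadB ((pvGdDict x).getD (g, d) []))) = pvAnyG x := by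
      rw [pvAnyG]
      apply PySem.List.any_congr_mem
      intro g hg
      apply PySem.List.any_congr_mem
      intro d hd
      rw [gd_bucket x g d hg hd]
    have hs : (pvGroups.map (fun g => (pvDays.map (fun d =>
        pvContribB pvGROUP_MUL pvGROUP_DAY ((pvGdDict x).getD (g, d) []))).sum)).sum = pvSumG x := by
      rw [pvSumG]
      congr 1
      apply List.map_congr_left
      intro g hg
      congr 1
      apply List.map_congr_left
      intro d hd
      rw [gd_bucket x g d hg hd]
    rw [hb, hs]
  have h3 : ∀ b0 : Bool, pvDays.foldl (fun b d => (PySem.List.pyRange 0 pvMaxPairCount 1).foldl (fun b n =>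
      b || (decide ((pvNcDict x).getD (d, n) 0 > pvLARGE_COUNT)
        || decide ((pvAllDict x).getD (d, n) 0 > (pvAud.length : Int)))) b) b0
      = (b0 || pvAnyN x) := by
    intro b0
    rw [orfold _
      (fun d => (PySem.List.pyRange 0 pvMaxPairCount 1).any (fun n =>
        decide ((pvNcDict x).getD (d, n) 0 > pvLARGE_COUNT)
          || decide ((pvAllDict x).getD (d, n) 0 > (pvAud.length : Int))))
      (fun s e => by
        rw [orfold _ (fun n => decide ((pvNcDict x).getD (e, n) 0 > pvLARGE_COUNT)
            || decide ((pvAllDict x).getD (e, n) 0 > (pvAud.length : Int)))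
          (fun s2 e2 => rfl) (PySem.List.pyRange 0 pvMaxPairCount 1) s])
      pvDays b0]
    have hb : pvDays.any (fun d => (PySem.List.pyRange 0 pvMaxPairCount 1).any (fun n =>
        decide ((pvNcDict x).getD (d, n) 0 > pvLARGE_COUNT)
          || decide ((pvAllDict x).getD (d, n) 0 > (pvAud.length : Int)))) = pvAnyN x := by
      rw [pvAnyN]
      apply PySem.List.any_congr_mem
      intro d hd
      apply PySem.List.any_congr_mem
      intro n hn
      rw [PySem.List.mem_pyRange_one] at hn
      rw [nc_getD x d n hd hn.1 hn.2, all_getD x d n hd hn.1 hn.2]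
    rw [hb]
  rw [h1, h2, h3]
  rw [pvCanon]
  by_cases ha : pvAnyT x = true <;> by_cases hb : pvAnyG x = true <;> by_cases hc : pvAnyN x = true <;>
    simp [ha, hb, hc, Int.add_assoc]

theorem evaluate_equal_all (x : List PvRec) : evaluate x = evaluate_alt x := by
  rw [A_eq_canon, B_eq_canon]

-- ===== VERDICT (by name: the statement is the Claim_ definition above) =====
theorem evaluate_spec : Claim_equal_evaluate := by
  intro x _
  unfold Spec_evaluate
  exact evaluate_equal_all x
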